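-- pv_equiv track=rewrite | github.com/lkwq007/leetcode-py | 915-Partition-Array-into-Disjoint-Interv.py | partitionDisjoint
-- ===== SOURCE A (Python) =====
-- from typing import List
--
-- def partitionDisjoint(A: List[int]) -> int:
--     left=[A[0]]*(len(A)+1)
--     right=[A[-1]]*(len(A)+1)
--     for i in range(len(A)):
--         left[i]=max(A[i],left[i-1])
--         idx=len(A)-i-1
--         right[idx]=min(A[idx],right[idx+1])
--     for i in range(len(A)-1):
--         if left[i]<=right[i+1]:
--             return i+1
-- ===== SOURCE B (Python) =====
-- from typing import List
--
-- def partitionDisjoint(A: List[int]) -> int: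
--     for i in range(1, len(A)):
--         if max(A[:i]) <= min(A[i:]):
--             return i
-- ===== Notes on version B (the rewrite author's own statement) =====
-- stated objective: simpler
-- what changed: A precomputes prefix-max and suffix-min arrays in one interleaved loop and then scans; B drops both arrays and directly returns the first split index i with max(A[:i]) <= min(A[i:]).
-- outside the precondition, e.g. on partitionDisjoint([]): A raises IndexError, B returns None; on partitionDisjoint([5]): A returns None, B returns None; on partitionDisjoint([2, 1]): A returns None, B returns None
import Mathlib
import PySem

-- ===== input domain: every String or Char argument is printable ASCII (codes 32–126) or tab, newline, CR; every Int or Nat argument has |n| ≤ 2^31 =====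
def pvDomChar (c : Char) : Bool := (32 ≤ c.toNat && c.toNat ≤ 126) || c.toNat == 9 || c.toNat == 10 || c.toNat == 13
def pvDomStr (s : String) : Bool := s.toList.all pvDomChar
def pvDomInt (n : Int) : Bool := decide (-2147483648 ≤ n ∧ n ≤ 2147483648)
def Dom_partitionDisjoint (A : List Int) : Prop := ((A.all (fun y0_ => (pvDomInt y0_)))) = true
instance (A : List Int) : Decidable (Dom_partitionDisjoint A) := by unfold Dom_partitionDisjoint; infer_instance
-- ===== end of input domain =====

-- B replaces A's interleaved prefix-max/suffix-min array construction by a direct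
-- quadratic search for the first split index (objective: simpler).

-- ===== PORT A =====
-- second loop of A: 'for i in range(len(A)-1): if left[i] <= right[i+1]: return i+1'
-- (Python falls through returning None there; None is not an int, those inputs are outside Pre_, the port returns 0)
def pvALoop (left right : List Int) (n i : Nat) : Int :=
  if _h : i < n - 1 then
    if PySem.List.pyGetD left (i : Int) 0 ≤ PySem.List.pyGetD right ((i : Int) + 1) 0 then
      ((i : Int) + 1)
    else pvALoop left right n (i + 1)
  else 0
termination_by n - 1 - i

def partitionDisjoint (A : List Int) : Int :=
  match PySem.List.pyGet? A 0 with
  | none => 0   -- A[0] raises IndexError on []; outside Pre_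
  | some a0 =>
    match PySem.List.pyGet? A (-1) with
    | none => 0   -- A[-1] raises IndexError on []; outside Pre_
    | some alast =>
      let n := A.length
      let lr := (List.range n).foldl
        (fun (lr : List Int × List Int) i =>
          let left := lr.1.set i (max (PySem.List.pyGetD A (i : Int) 0)
                                      (PySem.List.pyGetD lr.1 ((i : Int) - 1) 0))
          let idx := n - i - 1
          let right := lr.2.set idx (min (PySem.List.pyGetD A (idx : Int) 0)
                                         (PySem.List.pyGetD lr.2 ((idx : Int) + 1) 0))
          (left, right))
        (List.replicate (n + 1) a0, List.replicate (n + 1) alast)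
      pvALoop lr.1 lr.2 n 0

-- ===== PORT B =====
-- 'for i in range(1, len(A)): if max(A[:i]) <= min(A[i:]): return i'
def pvBLoop (A : List Int) (i : Nat) : Int :=
  if _h : i < A.length then
    match PySem.List.max? (PySem.List.slice A none (some (i : Int))) (fun x => x),
          PySem.List.min? (PySem.List.slice A (some (i : Int)) none) (fun x => x) with
    | some m, some mn => if m ≤ mn then (i : Int) else pvBLoop A (i + 1)
    | _, _ => 0   -- unreachable for 1 ≤ i < len: both slices are nonempty
  else 0          -- loop fell through: Python returns None, outside Pre_
termination_by A.length - i

def partitionDisjoint_alt (A : List Int) : Int := pvBLoop A 1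

-- ===== PRECONDITION & SPEC =====
-- Pre_ excludes the empty list (A raises IndexError) and inputs with no valid split point
-- (length < 2 or no i with max(A[:i]) <= min(A[i:])), on which A falls off the loop and
-- returns None, which is not a value of the declared int type.
def Pre_partitionDisjoint (A : List Int) : Prop :=
  ∃ i < A.length, 1 ≤ i ∧ ∀ x ∈ A.take i, ∀ y ∈ A.drop i, x ≤ y
instance (A : List Int) : Decidable (Pre_partitionDisjoint A) := by
  unfold Pre_partitionDisjoint; infer_instance
def pvWitness_partitionDisjoint : List Int := [1, 2]

def Spec_partitionDisjoint (A : List Int) (out : Int) : Prop := out = partitionDisjoint_alt A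
instance (A : List Int) (out : Int) : Decidable (Spec_partitionDisjoint A out) := by
  unfold Spec_partitionDisjoint; infer_instance

-- ===== CLAIM (what is proved, stated in full; the proofs are below) =====
def Claim_equal_partitionDisjoint : Prop :=
  ∀ (A : List Int), Dom_partitionDisjoint A → Pre_partitionDisjoint A →
    Spec_partitionDisjoint A (partitionDisjoint A)

-- ===== LEMMAS AND PROOFS =====

-- max of the first i elements / min of the elements from index i (as head-seeded folds)
def pvM (A : List Int) (i : Nat) : Int :=
  match A.take i with
  | [] => 0
  | x :: xs => xs.foldl max x

def pvN (A : List Int) (i : Nat) : Int :=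
  match A.drop i with
  | [] => 0
  | x :: xs => xs.foldl min x

theorem pv_foldl_min_min (l : List Int) (a b : Int) :
    l.foldl min (min a b) = min a (l.foldl min b) := by
  induction l generalizing b with
  | nil => simp
  | cons c t ih => simp only [List.foldl_cons, min_assoc, ih]

theorem pvM_one (A : List Int) (h : 0 < A.length) : pvM A 1 = A[0] := by
  cases A with
  | nil => simp at h
  | cons a t => simp [pvM]

theorem pvM_succ (A : List Int) (k : Nat) (h1 : 1 ≤ k) (hk : k < A.length) :
    pvM A (k + 1) = max (pvM A k) A[k] := by
  have ht : A.take (k + 1) = A.take k ++ [A[k]] := by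
    rw [List.take_add_one, List.getElem?_eq_getElem hk]; rfl
  obtain ⟨x, xs, hx⟩ : ∃ x xs, A.take k = x :: xs := by
    cases h' : A.take k with
    | nil =>
      exfalso
      have hlen : (A.take k).length = k := by
        rw [List.length_take]; omega
      rw [h'] at hlen
      simp at hlen
      omega
    | cons x xs => exact ⟨x, xs, rfl⟩
  unfold pvM
  rw [ht, hx]
  simp only [List.cons_append, List.foldl_concat]

theorem pvN_last (A : List Int) (h : 0 < A.length) :
    pvN A (A.length - 1) = A[A.length - 1] := by
  have hd : A.drop (A.length - 1) = [A[A.length - 1]] := by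
    rw [List.drop_eq_getElem_cons (by omega : A.length - 1 < A.length)]
    have h1 : A.length - 1 + 1 = A.length := by omega
    rw [h1, List.drop_length]
  unfold pvN
  rw [hd]
  rfl

theorem pvN_step (A : List Int) (j : Nat) (hj : j + 1 < A.length) :
    pvN A j = min A[j] (pvN A (j + 1)) := by
  have h1 : A.drop j = A[j] :: A.drop (j + 1) := List.drop_eq_getElem_cons (by omega)
  have h2 : A.drop (j + 1) = A[j + 1] :: A.drop (j + 2) := List.drop_eq_getElem_cons hj
  unfold pvN
  rw [h1, h2]
  simp only [List.foldl_cons]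
  exact pv_foldl_min_min _ _ _


theorem pv_left_step (A : List Int) (hA : A ≠ []) (k : Nat) (hkn : k < A.length) :
    ((List.range k).map (fun j => pvM A (j + 1)) ++ List.replicate (A.length + 1 - k) (A.head hA)).set k
      (max (PySem.List.pyGetD A (k : Int) 0)
        (PySem.List.pyGetD
          ((List.range k).map (fun j => pvM A (j + 1)) ++ List.replicate (A.length + 1 - k) (A.head hA))
          ((k : Int) - 1) 0))
    = (List.range (k + 1)).map (fun j => pvM A (j + 1))
        ++ List.replicate (A.length + 1 - (k + 1)) (A.head hA) := by
  have hgetA : A.getD k 0 = A[k] := List.getD_eq_getElem _ _ hkn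
  rcases Nat.eq_zero_or_pos k with hk0 | hk1
  · subst hk0
    simp only [List.range_zero, List.map_nil, List.nil_append, Nat.sub_zero]
    rw [show ((0 : Nat) : Int) - 1 = -1 by norm_num]
    rw [PySem.List.pyGetD_neg_one _ _ (by simp)]
    rw [List.getLast_replicate]
    simp only [PySem.List.pyGetD_natCast]
    rw [hgetA, List.head_eq_getElem]
    rw [List.replicate_succ, List.set_cons_zero]
    simp [pvM_one A (by omega)]
  · have hcast : ((k : Nat) : Int) - 1 = (((k - 1 : Nat)) : Int) := by omega
    rw [hcast]
    simp only [PySem.List.pyGetD_natCast]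
    rw [List.getD_append _ _ _ _ (by simp; omega)]
    have hread : ((List.range k).map (fun j => pvM A (j + 1))).getD (k - 1) 0 = pvM A k := by
      rw [List.getD_eq_getElem _ _ (by simp; omega)]
      simp only [List.getElem_map, List.getElem_range]
      congr 1
      omega
    rw [hread, hgetA]
    rw [show max A[k] (pvM A k) = pvM A (k + 1) by
      rw [max_comm]; exact (pvM_succ A k hk1 hkn).symm]
    rw [List.set_append]
    simp only [List.length_map, List.length_range, lt_irrefl, if_false, Nat.sub_self]
    rw [show A.length + 1 - k = (A.length - k) + 1 by omega, List.replicate_succ,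
      List.set_cons_zero]
    rw [List.range_succ]
    simp [List.append_assoc]

theorem pv_set_replicate (m i : Nat) (h : i < m) (a v : Int) :
    (List.replicate m a).set i v
      = List.replicate i a ++ v :: List.replicate (m - i - 1) a := by
  rw [List.set_eq_take_append_cons_drop]
  rw [if_pos (by simpa using h), List.take_replicate, List.drop_replicate]
  congr 2
  omega

theorem pv_right_step (A : List Int) (hA : A ≠ []) (k : Nat) (hkn : k < A.length) :
    (List.replicate (A.length - k) (A.getLast hA)
        ++ (List.range' (A.length - k) k).map (pvN A) ++ [A.getLast hA]).set (A.length - k - 1)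
      (min (PySem.List.pyGetD A ((A.length - k - 1 : Nat) : Int) 0)
        (PySem.List.pyGetD
          (List.replicate (A.length - k) (A.getLast hA)
            ++ (List.range' (A.length - k) k).map (pvN A) ++ [A.getLast hA])
          (((A.length - k - 1 : Nat) : Int) + 1) 0))
    = List.replicate (A.length - (k + 1)) (A.getLast hA)
        ++ (List.range' (A.length - (k + 1)) (k + 1)).map (pvN A) ++ [A.getLast hA] := by
  have hn1 : 1 ≤ A.length := by
    cases A with
    | nil => exact absurd rfl hA
    | cons a t => simp
  have hlast : A.getLast hA = A[A.length - 1] := List.getLast_eq_getElem hA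
  rcases Nat.eq_zero_or_pos k with hk0 | hk1
  · subst hk0
    simp only [Nat.sub_zero, List.range'_zero, List.map_nil, List.append_nil]
    rw [← List.replicate_succ' (n := A.length)]
    rw [show ((A.length - 1 : Nat) : Int) + 1 = ((A.length : Nat) : Int) by omega]
    simp only [PySem.List.pyGetD_natCast]
    rw [List.getD_replicate _ (by omega)]
    rw [List.getD_eq_getElem _ _ (by omega : A.length - 1 < A.length)]
    rw [pv_set_replicate _ _ (by omega)]
    rw [List.range'_succ, List.range'_zero]
    simp only [List.map_cons, List.map_nil]
    rw [pvN_last A (by omega), ← hlast]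
    simp [min_self]
    rw [show A.length + 1 - (A.length - 1) - 1 = 1 by omega]
    simp
  · have hnk : A.length - k - 1 + 1 = A.length - k := by omega
    have hcast : ((A.length - k - 1 : Nat) : Int) + 1 = ((A.length - k : Nat) : Int) := by
      rw [← hnk]
      push_cast
      ring
    rw [hcast]
    simp only [PySem.List.pyGetD_natCast]
    rw [List.getD_append _ _ _ _ (by simp; omega)]
    rw [List.getD_append_right _ _ _ _ (by simp)]
    have hread : ((List.range' (A.length - k) k).map (pvN A)).getD
        (A.length - k - (List.replicate (A.length - k) (A.getLast hA)).length) 0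
        = pvN A (A.length - k) := by
      rw [List.getD_eq_getElem _ _ (by simp; omega)]
      simp only [List.getElem_map, List.getElem_range']
      congr 1
      simp
    rw [hread]
    rw [List.getD_eq_getElem _ _ (by omega : A.length - k - 1 < A.length)]
    have hmin : min A[A.length - k - 1] (pvN A (A.length - k)) = pvN A (A.length - k - 1) := by
      have hpv : pvN A (A.length - k) = pvN A (A.length - k - 1 + 1) := by rw [hnk]
      rw [hpv]
      exact (pvN_step A (A.length - k - 1) (by omega)).symm
    rw [hmin]
    rw [List.set_append, if_pos (by simp; omega)]
    rw [List.set_append, if_pos (by simp; omega)]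
    rw [pv_set_replicate _ _ (by omega)]
    rw [show A.length - (k + 1) = A.length - k - 1 by omega]
    rw [show List.range' (A.length - k - 1) (k + 1) = (A.length - k - 1) :: List.range' (A.length - k) k by
      rw [List.range'_succ, hnk]]
    simp only [List.map_cons]
    rw [show A.length - k - (A.length - k - 1) - 1 = 0 by omega, List.replicate_zero]
    simp [List.append_assoc]

-- invariant of A's first loop after k steps
theorem pvA_fold_inv (A : List Int) (hA : A ≠ []) (k : Nat) (hk : k ≤ A.length) :
    (List.range k).foldl
      (fun (lr : List Int × List Int) i =>
        let left := lr.1.set i (max (PySem.List.pyGetD A (i : Int) 0)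
                                    (PySem.List.pyGetD lr.1 ((i : Int) - 1) 0))
        let idx := A.length - i - 1
        let right := lr.2.set idx (min (PySem.List.pyGetD A (idx : Int) 0)
                                       (PySem.List.pyGetD lr.2 ((idx : Int) + 1) 0))
        (left, right))
      (List.replicate (A.length + 1) (A.head hA), List.replicate (A.length + 1) (A.getLast hA))
    = ((List.range k).map (fun j => pvM A (j + 1)) ++ List.replicate (A.length + 1 - k) (A.head hA),
       List.replicate (A.length - k) (A.getLast hA) ++ (List.range' (A.length - k) k).map (pvN A)
         ++ [A.getLast hA]) := by
  induction k with
  | zero =>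
    simp only [List.range_zero, List.foldl_nil, List.map_nil, List.nil_append, Nat.sub_zero,
      List.range'_zero]
    simp [List.replicate_succ']
  | succ k ih =>
    have hkn : k < A.length := by omega
    have hn1 : 1 ≤ A.length := by omega
    rw [List.range_succ, List.foldl_append, ih (by omega)]
    simp only [List.foldl_cons, List.foldl_nil]
    show (_, _) = (_, _)
    rw [Prod.mk.injEq]
    constructor
    · have := pv_left_step A hA k hkn
      rw [List.range_succ] at this
      simpa using this
    · exact pv_right_step A hA k hkn

-- the two scan loops agree given the array characterisation
theorem pv_loops_agree (A : List Int) (left right : List Int)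
    (hL : ∀ j, j < A.length → left.getD j 0 = pvM A (j + 1))
    (hR : ∀ j, j + 1 < A.length → right.getD (j + 1) 0 = pvN A (j + 1)) :
    ∀ i, pvALoop left right A.length i = pvBLoop A (i + 1) := by
  have key : ∀ fuel i, A.length - i ≤ fuel →
      pvALoop left right A.length i = pvBLoop A (i + 1) := by
    intro fuel
    induction fuel with
    | zero =>
      intro i hi
      rw [pvALoop, pvBLoop, dif_neg (by omega), dif_neg (by omega)]
    | succ fuel ih =>
      intro i hi
      by_cases hlt : i < A.length - 1
      · rw [pvALoop, pvBLoop, dif_pos hlt, dif_pos (by omega : i + 1 < A.length)]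
        obtain ⟨x, xs, hx⟩ : ∃ x xs, A.take (i + 1) = x :: xs := by
          cases h' : A.take (i + 1) with
          | nil =>
            exfalso
            have hlen : (A.take (i + 1)).length = i + 1 := by
              rw [List.length_take]; omega
            rw [h'] at hlen
            simp at hlen
          | cons x xs => exact ⟨x, xs, rfl⟩
        obtain ⟨y, ys, hy⟩ : ∃ y ys, A.drop (i + 1) = y :: ys := by
          cases h' : A.drop (i + 1) with
          | nil =>
            exfalso
            have hlen : (A.drop (i + 1)).length = A.length - (i + 1) := by
              rw [List.length_drop]
            rw [h'] at hlen
            simp at hlen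
            omega
          | cons y ys => exact ⟨y, ys, rfl⟩
        rw [PySem.List.slice_to_natCast, PySem.List.slice_from_natCast, hx, hy,
          PySem.List.max?_id_cons, PySem.List.min?_id_cons]
        have hM : pvM A (i + 1) = xs.foldl max x := by unfold pvM; rw [hx]
        have hN : pvN A (i + 1) = ys.foldl min y := by unfold pvN; rw [hy]
        simp only [PySem.List.pyGetD_natCast]
        rw [show ((i : Nat) : Int) + 1 = (((i + 1 : Nat)) : Int) by push_cast; ring]
        rw [PySem.List.pyGetD_natCast, hL i (by omega), hR i (by omega), hM, hN]
        split_ifs with hcond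
        · push_cast; ring
        · exact ih (i + 1) (by omega)
      · rw [pvALoop, pvBLoop, dif_neg hlt, dif_neg (by omega)]
  intro i
  exact key (A.length - i) i (le_refl _)

theorem pv_ports_agree (A : List Int) : partitionDisjoint A = partitionDisjoint_alt A := by
  cases A with
  | nil =>
    unfold partitionDisjoint partitionDisjoint_alt
    rw [pvBLoop]
    simp [PySem.List.pyGet?, PySem.List.pyIdx?]
  | cons a t =>
    have hA : (a :: t) ≠ [] := by simp
    have h0 : PySem.List.pyGet? (a :: t) 0 = some a := PySem.List.pyGet?_zero_cons a t
    have h1 : PySem.List.pyGet? (a :: t) (-1) = some ((a :: t).getLast hA) := by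
      rw [PySem.List.pyGet?_neg_one, List.getLast?_eq_some_getLast]
    have hfold := pvA_fold_inv (a :: t) hA (a :: t).length (le_refl _)
    rw [List.head_cons] at hfold
    unfold partitionDisjoint
    rw [h0, h1]
    show pvALoop _ _ (a :: t).length 0 = _
    rw [hfold]
    have hL : ∀ j, j < (a :: t).length →
        ((List.range (a :: t).length).map (fun j => pvM (a :: t) (j + 1))
          ++ List.replicate ((a :: t).length + 1 - (a :: t).length) a).getD j 0
          = pvM (a :: t) (j + 1) := by
      intro j hj
      rw [List.getD_append _ _ _ _ (by simpa using hj)]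
      rw [List.getD_eq_getElem _ _ (by simpa using hj)]
      simp
    have hR : ∀ j, j + 1 < (a :: t).length →
        (List.replicate ((a :: t).length - (a :: t).length) ((a :: t).getLast hA)
          ++ (List.range' ((a :: t).length - (a :: t).length) (a :: t).length).map (pvN (a :: t))
          ++ [(a :: t).getLast hA]).getD (j + 1) 0
          = pvN (a :: t) (j + 1) := by
      intro j hj
      simp only [Nat.sub_self, List.replicate_zero, List.nil_append]
      rw [List.getD_append _ _ _ _ (by simpa using hj)]
      rw [List.getD_eq_getElem _ _ (by simpa using hj)]
      simp
    exact pv_loops_agree (a :: t) _ _ hL hR 0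

-- ===== VERDICT (by name: the statement is the Claim_ definition above) =====
theorem partitionDisjoint_spec : Claim_equal_partitionDisjoint := by
  intro A _ _
  unfold Spec_partitionDisjoint
  exact pv_ports_agree A
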